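-- pv_equiv track=rewrite | github.com/greivinlopez/coding-solutions | python/leetcode/problems_0500_0599/566_reshape_the_matrix.py | matrix_reshape
-- ===== SOURCE A (Python) =====
-- def matrix_reshape(mat, r, c):
--     # Get dimensions of the original matrix
--     rows, cols = len(mat), len(mat[0])
--
--     # Check if reshape is possible (total elements must match)
--     if rows * cols != r * c:
--         return mat
--
--     # Initialize the reshaped matrix with zeros
--     reshaped_matrix = [[0] * c for _ in range(r)]
--
--     # Iterate through all elements using a single index
--     for index in range(rows * cols):
--         # Calculate source position in original matrix
--         source_row = index // cols
--         source_col = index % cols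
--
--         # Calculate target position in reshaped matrix
--         target_row = index // c
--         target_col = index % c
--
--         # Copy element from source to target position
--         reshaped_matrix[target_row][target_col] = mat[source_row][source_col]
--
--     return reshaped_matrix
-- ===== SOURCE B (Python) =====
-- def matrix_reshape(mat, r, c):
--     rows, cols = len(mat), len(mat[0])
--     if rows * cols != r * c:
--         return mat
--     flat = [x for row in mat for x in row[:cols]]
--     return [flat[i * c:(i + 1) * c] for i in range(r)]
-- ===== Notes on version B (the rewrite author's own statement) =====
-- stated objective: simpler
-- what changed: Replaces the zero-matrix-plus-per-element-div/mod-writes loop by flattening the matrix in row-major order and rebuilding the result with contiguous slices flat[i*c:(i+1)*c].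
import Mathlib
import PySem

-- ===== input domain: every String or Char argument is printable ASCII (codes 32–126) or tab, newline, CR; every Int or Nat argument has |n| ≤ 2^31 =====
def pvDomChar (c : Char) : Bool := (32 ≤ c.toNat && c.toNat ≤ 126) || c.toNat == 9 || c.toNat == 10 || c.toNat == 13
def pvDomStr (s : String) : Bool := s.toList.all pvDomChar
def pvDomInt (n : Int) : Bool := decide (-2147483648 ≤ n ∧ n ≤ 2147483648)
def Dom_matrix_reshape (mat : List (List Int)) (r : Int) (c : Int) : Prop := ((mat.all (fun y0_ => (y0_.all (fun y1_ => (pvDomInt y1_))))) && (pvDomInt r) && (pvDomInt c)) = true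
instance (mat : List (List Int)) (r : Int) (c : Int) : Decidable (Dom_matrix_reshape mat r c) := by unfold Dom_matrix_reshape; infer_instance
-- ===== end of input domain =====

-- B flattens the matrix row-major and rebuilds the rows by contiguous slicing, instead of
-- A's zero matrix filled by per-element div/mod index writes.

-- ===== PORT A =====
-- reshaped[i][j] = v; exact for the nonnegative in-range indices Pre_ guarantees
def pvSetAt (m : List (List Int)) (i j : Int) (v : Int) : List (List Int) :=
  m.set i.toNat ((m.getD i.toNat []).set j.toNat v)

def matrix_reshape (mat : List (List Int)) (r : Int) (c : Int) : List (List Int) :=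
  let rows : Int := mat.length
  let cols : Int := (mat.headD []).length
  if rows * cols ≠ r * c then mat
  else
    let init : List (List Int) := (PySem.List.pyRange 0 r 1).map (fun _ => List.replicate c.toNat 0)
    (PySem.List.pyRange 0 (rows * cols) 1).foldl (fun reshaped index =>
      let source_row := PySem.Int.floordiv index cols
      let source_col := PySem.Int.mod index cols
      let target_row := PySem.Int.floordiv index c
      let target_col := PySem.Int.mod index c
      pvSetAt reshaped target_row target_col
        (PySem.List.pyGetD (PySem.List.pyGetD mat source_row []) source_col 0)) init

-- ===== PORT B =====
def matrix_reshape_alt (mat : List (List Int)) (r : Int) (c : Int) : List (List Int) :=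
  let rows : Int := mat.length
  let cols : Int := (mat.headD []).length
  if rows * cols ≠ r * c then mat
  else
    let flat : List Int := mat.flatMap (fun row => PySem.List.slice row none (some cols))
    (PySem.List.pyRange 0 r 1).map (fun i =>
      PySem.List.slice flat (some (i * c)) (some ((i + 1) * c)))

-- ===== PRECONDITION & SPEC =====
-- Pre_ excludes exactly the inputs where A raises: empty mat (IndexError on mat[0]), and — when the
-- element counts match — rows shorter than len(mat[0]) or a negative r (both make an index write/read
-- in A's loop raise IndexError).
def Pre_matrix_reshape (mat : List (List Int)) (r : Int) (c : Int) : Prop :=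
  mat ≠ [] ∧
  ((mat.length : Int) * ((mat.headD []).length : Int) = r * c →
    ((∀ row ∈ mat, (mat.headD []).length ≤ row.length) ∧
     (0 < (mat.length : Int) * ((mat.headD []).length : Int) → 0 < r)))
instance (mat : List (List Int)) (r : Int) (c : Int) : Decidable (Pre_matrix_reshape mat r c) := by
  unfold Pre_matrix_reshape; infer_instance

def pvWitness_matrix_reshape : List (List Int) × Int × Int := ([[1, 2], [3, 4]], 4, 1)

def Spec_matrix_reshape (mat : List (List Int)) (r : Int) (c : Int) (out : List (List Int)) : Prop := out = matrix_reshape_alt mat r c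
instance (mat : List (List Int)) (r : Int) (c : Int) (out : List (List Int)) : Decidable (Spec_matrix_reshape mat r c out) := by unfold Spec_matrix_reshape; infer_instance

-- ===== CLAIM (what is proved, stated in full; the proofs are below) =====
def Claim_equal_matrix_reshape : Prop := ∀ (mat : List (List Int)) (r : Int) (c : Int), Dom_matrix_reshape mat r c → Pre_matrix_reshape mat r c → Spec_matrix_reshape mat r c (matrix_reshape mat r c)

-- ===== LEMMAS AND PROOFS =====

-- the common value both programs compute in the main branch, element by element
def pvTT (flat : List Int) (R C k : Nat) : List (List Int) :=
  (List.range R).map (fun i => (List.range C).map (fun j =>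
    if i * C + j < k then flat.getD (i * C + j) 0 else 0))

theorem pv_flat_length (mat : List (List Int)) (C0 : Nat)
    (h : ∀ row ∈ mat, C0 ≤ row.length) :
    (mat.flatMap (fun row => row.take C0)).length = mat.length * C0 := by
  induction mat with
  | nil => simp
  | cons row rest ih =>
    simp only [List.flatMap_cons, List.length_append, List.length_take]
    rw [ih (fun r hr => h r (List.mem_cons_of_mem _ hr))]
    have := h row (List.mem_cons_self ..)
    simp [Nat.min_eq_left this, Nat.succ_mul, Nat.add_comm]

theorem pv_flat_get (mat : List (List Int)) (C0 : Nat) (hC0 : 0 < C0)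
    (h : ∀ row ∈ mat, C0 ≤ row.length) (k : Nat) (hk : k < mat.length * C0) :
    (mat.flatMap (fun row => row.take C0)).getD k 0
      = ((mat.getD (k / C0) []).getD (k % C0) 0) := by
  induction mat generalizing k with
  | nil => simp at hk
  | cons row rest ih =>
    have hrow := h row (List.mem_cons_self ..)
    simp only [List.flatMap_cons]
    have hlen : (row.take C0).length = C0 := by simp [Nat.min_eq_left hrow]
    by_cases hkc : k < C0
    · rw [List.getD_eq_getElem _ _ (by simp [List.length_append, hlen]; omega),
         List.getElem_append_left (by omega : k < (row.take C0).length)]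
      rw [Nat.div_eq_of_lt hkc, Nat.mod_eq_of_lt hkc]
      simp only [List.getD_cons_zero]
      rw [List.getD_eq_getElem _ _ (by omega)]
      simp
    · have h2 : k - C0 < rest.length * C0 := by
        simp only [List.length_cons, Nat.succ_mul] at hk; omega
      have hkk : k < ((row.take C0) ++ rest.flatMap (fun row => row.take C0)).length := by
        rw [List.length_append, hlen,
            pv_flat_length rest C0 (fun r hr => h r (List.mem_cons_of_mem _ hr))]; omega
      rw [List.getD_eq_getElem _ _ hkk,
          List.getElem_append_right (by omega : (row.take C0).length ≤ k)]
      rw [← List.getD_eq_getElem _ 0, hlen]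
      rw [ih (fun r hr => h r (List.mem_cons_of_mem _ hr)) (k - C0) h2]
      have hk' : k = (k - C0) + C0 := by omega
      rw [hk', Nat.add_div_right _ hC0, Nat.add_mod_right]
      simp

theorem pv_div_lt (k R C : Nat) (hC : 0 < C) (hk : k < R * C) : k / C < R :=
  Nat.div_lt_iff_lt_mul hC |>.mpr (by omega)

theorem pv_set_step (flat : List Int) (R C k : Nat) (hC : 0 < C) (hk : k < R * C) :
    pvSetAt (pvTT flat R C k) ((k / C : Nat) : Int) ((k % C : Nat) : Int) (flat.getD k 0)
      = pvTT flat R C (k + 1) := by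
  have hdiv : k / C < R := pv_div_lt k R C hC hk
  have hmod : k % C < C := Nat.mod_lt _ hC
  have hdm : k / C * C + k % C = k := by rw [Nat.div_add_mod' k C]
  unfold pvSetAt pvTT
  simp only [Int.toNat_natCast]
  apply List.ext_getElem
  · simp
  intro i hi hi'
  simp only [List.length_set, List.length_map, List.length_range] at hi
  rw [List.getElem_set]
  by_cases hia : k / C = i
  · subst hia
    rw [if_pos rfl]
    rw [List.getD_eq_getElem _ _ (by simp [hdiv])]
    simp only [List.getElem_map, List.getElem_range]
    apply List.ext_getElem
    · simp
    intro j hj hj'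
    simp only [List.length_set, List.length_map, List.length_range] at hj
    rw [List.getElem_set]
    by_cases hjb : k % C = j
    · subst hjb
      rw [if_pos rfl]
      simp only [List.getElem_map, List.getElem_range]
      rw [hdm, if_pos (by omega)]
    · rw [if_neg hjb]
      simp only [List.getElem_map, List.getElem_range]
      have h1 : k / C * C + j ≠ k := by omega
      have hiff : (k / C * C + j < k) ↔ (k / C * C + j < k + 1) := by omega
      simp [hiff]
  · rw [if_neg hia]
    simp only [List.getElem_map, List.getElem_range]
    apply List.ext_getElem
    · simp
    intro j hj hj'
    simp only [List.length_map, List.length_range] at hj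
    simp only [List.getElem_map, List.getElem_range]
    have h1 : i * C + j ≠ k := by
      intro he
      apply hia
      have h2 : (j + i * C) / C = j / C + i := Nat.add_mul_div_right j i hC
      rw [Nat.div_eq_of_lt hj] at h2
      rw [Nat.add_comm] at he
      rw [he] at h2
      omega
    have hiff : (i * C + j < k) ↔ (i * C + j < k + 1) := by omega
    simp [hiff]

theorem pv_loop (mat : List (List Int)) (flat : List Int) (R C C0 : Nat)
    (hC : 0 < C) (hC0 : 0 < C0)
    (hrect : ∀ row ∈ mat, C0 ≤ row.length)
    (hflat : flat = mat.flatMap (fun row => row.take C0))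
    (hRC : mat.length * C0 = R * C) :
    ∀ k, k ≤ R * C →
    (PySem.List.pyRange 0 (k : Int) 1).foldl (fun reshaped index =>
      pvSetAt reshaped (PySem.Int.floordiv index (C : Int)) (PySem.Int.mod index (C : Int))
        (PySem.List.pyGetD (PySem.List.pyGetD mat (PySem.Int.floordiv index (C0 : Int)) [])
          (PySem.Int.mod index (C0 : Int)) 0))
      (pvTT flat R C 0)
      = pvTT flat R C k := by
  intro k hk
  induction k with
  | zero => simp [PySem.List.pyRange_one_eq_nil]
  | succ k ih =>
    have hk' : k ≤ R * C := by omega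
    have : ((k : Int) + 1) = ((k + 1 : Nat) : Int) := by push_cast; ring
    rw [← this, PySem.List.pyRange_one_succ_right (by positivity), List.foldl_append, ih hk']
    simp only [List.foldl_cons, List.foldl_nil]
    rw [PySem.Int.floordiv_natCast, PySem.Int.mod_natCast,
        PySem.Int.floordiv_natCast k C0, PySem.Int.mod_natCast k C0]
    rw [PySem.List.pyGetD_natCast, PySem.List.pyGetD_natCast]
    rw [← pv_flat_get mat C0 hC0 hrect k (by omega), ← hflat]
    exact pv_set_step flat R C k hC (by omega)

theorem pv_chunk (flat : List Int) (R C i : Nat) (hlen : flat.length = R * C) (hi : i < R) :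
    (List.range C).map (fun j => flat.getD (i * C + j) 0) = (flat.drop (i * C)).take C := by
  have hle : i * C + C ≤ R * C := by
    have : (i + 1) * C ≤ R * C := Nat.mul_le_mul_right _ (by omega)
    simpa [Nat.add_mul] using this
  apply List.ext_getElem
  · simp [hlen]; omega
  intro j hj hj'
  simp only [List.length_map, List.length_range] at hj
  simp only [List.getElem_map, List.getElem_range, List.getElem_take, List.getElem_drop]
  rw [List.getD_eq_getElem _ _ (by omega)]

-- ===== VERDICT (by name: the statement is the Claim_ definition above) =====
theorem matrix_reshape_spec : Claim_equal_matrix_reshape := by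
  intro mat r c hdom hpre
  unfold Spec_matrix_reshape matrix_reshape matrix_reshape_alt
  obtain ⟨hne, hmain⟩ := hpre
  by_cases hg : (mat.length : Int) * ((mat.headD []).length : Int) = r * c
  · obtain ⟨hrect, hrpos⟩ := hmain hg
    simp only [hg, ne_eq, not_true_eq_false, if_false]
    by_cases hz : (mat.headD []).length = 0
    · -- zero columns: r*c = 0, every produced row is empty on both sides
      have hrc : r * c = 0 := by rw [← hg, hz]; push_cast; ring
      have hflat : mat.flatMap (fun row => PySem.List.slice row none (some ((mat.headD []).length : Int))) = [] := by
        rw [hz]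
        simp [PySem.List.slice_to, List.flatMap]
      rw [hflat, hrc, show PySem.List.pyRange 0 (0:Int) 1 = [] from PySem.List.pyRange_one_eq_nil le_rfl]
      simp only [List.foldl_nil]
      apply List.map_congr_left
      intro i hi
      obtain ⟨h0i, hir⟩ := PySem.List.mem_pyRange_one.mp hi
      have hc0 : c = 0 := by
        rcases mul_eq_zero.mp hrc with h | h
        · omega
        · exact h
      rw [hc0]
      rw [show i * (0:Int) = ((0:Nat):Int) by ring, show (i + 1) * (0:Int) = ((0:Nat):Int) + ((0:Nat):Int) by ring]
      rw [PySem.List.slice_natCast_add]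
      simp
    · -- main case: positive dimensions
      have hC0pos : 0 < (mat.headD []).length := Nat.pos_of_ne_zero hz
      have hR0 : 0 < mat.length := List.length_pos_iff.mpr hne
      have hprod : (0:Int) < (mat.length : Int) * ((mat.headD []).length : Int) := by positivity
      have hr : 0 < r := hrpos hprod
      have hc : 0 < c := by nlinarith [hg]
      lift r to Nat using hr.le with R
      lift c to Nat using hc.le with C
      have hC : 0 < C := by exact_mod_cast hc
      have hRC : mat.length * (mat.headD []).length = R * C := by exact_mod_cast hg
      have hslice : (fun row => PySem.List.slice row none (some (((mat.headD []).length : Nat) : Int)))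
          = fun row : List Int => row.take (mat.headD []).length := by
        funext row; exact PySem.List.slice_to_natCast row _
      rw [hslice]
      set C0 := (mat.headD []).length with hC0def
      set flat : List Int := mat.flatMap (fun row => row.take C0) with hflatdef
      have hlenflat : flat.length = R * C := by
        rw [hflatdef, pv_flat_length mat C0 hrect, hRC]
      have hcast : (R : Int) * (C : Int) = (((R * C : Nat)) : Int) := by
        push_cast; ring
      rw [hcast]
      have hinit : (PySem.List.pyRange 0 (R : Int) 1).map (fun _ => List.replicate ((C : Int)).toNat (0:Int))
          = pvTT flat R C 0 := by
        unfold pvTT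
        rw [PySem.List.pyRange_one 0 R, List.map_map]
        simp only [Int.sub_zero, Int.toNat_natCast]
        apply List.map_congr_left
        intro i _
        simp only [Function.comp_apply]
        apply List.ext_getElem
        · simp
        intro j hj hj'
        simp
      rw [hinit, pv_loop mat flat R C C0 hC hC0pos hrect hflatdef hRC (R * C) le_rfl]
      -- both sides are now row i = flat[i*C : (i+1)*C]
      have hTT : pvTT flat R C (R * C) = (List.range R).map (fun i => (flat.drop (i * C)).take C) := by
        unfold pvTT
        apply List.map_congr_left
        intro i hi
        simp only [List.mem_range] at hi
        rw [← pv_chunk flat R C i hlenflat hi]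
        apply List.map_congr_left
        intro j hj
        simp only [List.mem_range] at hj
        have h1 : (i + 1) * C ≤ R * C := Nat.mul_le_mul_right _ (by omega)
        have h2 : i * C + C ≤ R * C := by simpa [Nat.add_mul] using h1
        rw [if_pos (by omega)]
      rw [hTT, PySem.List.pyRange_one 0 R, List.map_map]
      simp only [Int.sub_zero, Int.toNat_natCast]
      apply List.map_congr_left
      intro i _
      simp only [Function.comp_apply, Int.zero_add]
      rw [show ((i : Int)) * (C : Int) = (((i * C : Nat)) : Int) by push_cast; ring,
          show ((i : Int) + 1) * (C : Int) = (((i * C : Nat)) : Int) + ((C : Nat) : Int) by push_cast; ring]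
      rw [PySem.List.slice_natCast_add]
  · simp only [ne_eq, hg, not_false_eq_true, if_true]
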